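-- pv_equiv track=rewrite | github.com/MrBrantCode/unitest_baseline | mut_generate/mist_train_taco/taco_17733/solution.py | generate_increasing_numbers
-- ===== SOURCE A (Python) =====
-- def generate_increasing_numbers(N):
--     def solve(k, n, curr, prev=0):
--         if k == n:
--             result.append(curr)
--             return
--         for i in range(prev + 1, 10):
--             curr = curr * 10 + i
--             solve(k + 1, n, curr, i)
--             curr = curr // 10
--
--     result = [] if N != 1 else [0]
--     solve(0, N, 0)
--     return result
-- ===== SOURCE B (Python) =====
-- def generate_increasing_numbers(N):
--     # Iterative breadth-first construction: build all strictly-increasing digit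
--     # strings level by level instead of A's depth-first recursion; stop as soon
--     # as a level is empty (no longer strictly-increasing numbers exist).
--     if N < 0:
--         return []
--     level = [(0, 0)]  # (number built so far, last digit used)
--     count = 0
--     while count < N and level:
--         level = [(num * 10 + d, d)
--                  for num, last in level
--                  for d in range(last + 1, 10)]
--         count += 1
--     result = [0] if N == 1 else []
--     result.extend(num for num, _ in level)
--     return result
-- ===== Notes on version B (the rewrite author's own statement) =====
-- stated objective: alternative
-- what changed: Replaced A's depth-first recursion (with an appended-to closure list and curr*10//10 backtracking) by an iterative breadth-first level construction: each pass extends every (number, last-digit) pair by all larger digits, so N list-comprehension passes replace the recursion entirely.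
import Mathlib
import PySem

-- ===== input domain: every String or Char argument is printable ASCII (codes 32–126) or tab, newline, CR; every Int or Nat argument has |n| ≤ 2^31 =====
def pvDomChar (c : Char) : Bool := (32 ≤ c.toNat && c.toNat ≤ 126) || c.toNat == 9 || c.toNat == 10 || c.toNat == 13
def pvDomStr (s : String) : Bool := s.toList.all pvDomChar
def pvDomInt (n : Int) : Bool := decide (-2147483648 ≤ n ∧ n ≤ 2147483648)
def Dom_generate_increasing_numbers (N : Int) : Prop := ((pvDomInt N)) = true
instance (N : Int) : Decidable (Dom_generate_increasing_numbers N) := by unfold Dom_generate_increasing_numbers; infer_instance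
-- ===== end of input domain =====

-- B replaces A's depth-first recursion by an iterative breadth-first level construction
-- (objective: alternative — structurally different, same cost).

-- ===== PORT A =====
-- A's nested `solve(k, n, curr, prev)` mutates `curr` and appends to the closure list
-- `result`; the port threads that mutable state as (curr, result) through the loop's foldl.
-- The fuel argument only makes the recursion structural: `prev` strictly increases along a
-- call chain and stays < 10, so the recursion depth is at most 10 and fuel 11 is never hit.
def solveA : Nat → Int → Int → Int → Int → List Int → List Int
  | 0, _, _, _, _, res => res
  | fuel+1, k, n, curr, prev, res =>
    if k = n then res ++ [curr]
    else ((PySem.List.pyRange (prev + 1) 10 1).foldl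
        (fun (st : Int × List Int) i =>
          let c := st.1 * 10 + i
          (PySem.Int.floordiv c 10, solveA fuel (k + 1) n c i st.2))
        (curr, res)).2

def generate_increasing_numbers (N : Int) : List Int :=
  let result : List Int := if N ≠ 1 then [] else [0]
  solveA 11 0 N 0 0 result

-- ===== PORT B =====
-- one level-extension pass of Source B's comprehension
def bfsStep (lv : List (Int × Int)) : List (Int × Int) :=
  lv.flatMap (fun p => (PySem.List.pyRange (p.2 + 1) 10 1).map (fun d => (p.1 * 10 + d, d)))

-- Source B's while loop: `while count < N and level: level = bfsStep(level); count += 1`.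
-- The fuel argument only makes it structural: the last digit of every pair in the level
-- after c passes is ≥ c, so the level is empty after at most 10 passes and fuel 11 is never hit.
def bfsLoop : Nat → Int → Int → List (Int × Int) → List (Int × Int)
  | 0, _, _, lv => lv
  | f+1, N, c, lv => if c < N ∧ lv ≠ [] then bfsLoop f N (c + 1) (bfsStep lv) else lv

def generate_increasing_numbers_alt (N : Int) : List Int :=
  if N < 0 then []
  else
    let level := bfsLoop 11 N 0 [((0:Int), (0:Int))]
    (if N = 1 then [0] else []) ++ level.map Prod.fst

-- ===== PRECONDITION & SPEC =====
def Spec_generate_increasing_numbers (N : Int) (out : List Int) : Prop := out = generate_increasing_numbers_alt N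
instance (N : Int) (out : List Int) : Decidable (Spec_generate_increasing_numbers N out) := by unfold Spec_generate_increasing_numbers; infer_instance

-- ===== CLAIM (what is proved, stated in full; the proofs are below) =====
def Claim_equal_generate_increasing_numbers : Prop := ∀ (N : Int), Dom_generate_increasing_numbers N → Spec_generate_increasing_numbers N (generate_increasing_numbers N)

-- ===== LEMMAS AND PROOFS =====

-- a foldl whose step leaves the second component unchanged leaves it unchanged overall
lemma foldl_snd_fixed {α β γ : Type} (f : β × γ → α → β × γ) (l : List α)
    (h : ∀ st a, a ∈ l → (f st a).2 = st.2) :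
    ∀ init : β × γ, (l.foldl f init).2 = init.2 := by
  induction l with
  | nil => intro init; rfl
  | cons x xs ih =>
    intro init
    rw [List.foldl_cons, ih (fun st a ha => h st a (List.mem_cons_of_mem _ ha))]
    exact h init x (List.mem_cons_self)

-- if n is outside the reachable window [k, k + (9 - prev)], solve never appends
lemma solveA_unreached (fuel : Nat) : ∀ (k n curr prev : Int) (res : List Int),
    prev ≤ 9 → (n < k ∨ k + (9 - prev) < n) → solveA fuel k n curr prev res = res := by
  induction fuel with
  | zero => intro _ _ _ _ _ _ _; rfl
  | succ fuel ih =>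
    intro k n curr prev res hprev hn
    have hk : k ≠ n := by omega
    simp only [solveA, if_neg (fun h => hk h)]
    apply foldl_snd_fixed
    intro st i hi
    have hmem := (PySem.List.mem_pyRange_one).1 hi
    exact ih (k + 1) n (st.1 * 10 + i) i st.2 (by omega) (by omega)

lemma bfsStep_ten : bfsStep^[10] [((0:Int), (0:Int))] = [] := by decide

-- once k more passes would empty the level (and the loop still has k iterations to go),
-- the loop ends with the empty level
lemma bfsLoop_eq_nil (N : Int) : ∀ (k f : Nat) (c : Int) (lv : List (Int × Int)),
    bfsStep^[k] lv = [] → c + k ≤ N → k ≤ f → bfsLoop f N c lv = [] := by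
  intro k
  induction k with
  | zero =>
    intro f c lv hlv _ _
    cases f <;> simp_all [bfsLoop]
  | succ k ih =>
    intro f c lv hlv hc hf
    obtain ⟨f', rfl⟩ : ∃ f', f = f' + 1 := ⟨f - 1, by omega⟩
    by_cases hnil : lv = []
    · simp [bfsLoop, hnil]
    · rw [bfsLoop, if_pos ⟨by omega, hnil⟩]
      exact ih f' (c + 1) (bfsStep lv) (by rwa [← Function.iterate_succ_apply]) (by omega) (by omega)

lemma alt_big (N : Int) (hN : 10 ≤ N) : generate_increasing_numbers_alt N = [] := by
  have h0 : ¬ N < 0 := by omega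
  have h1 : N ≠ 1 := by omega
  simp only [generate_increasing_numbers_alt, if_neg h0, if_neg h1]
  rw [bfsLoop_eq_nil N 10 11 0 _ bfsStep_ten (by omega) (by omega)]
  rfl

-- ===== VERDICT (by name: the statement is the Claim_ definition above) =====
set_option maxRecDepth 8192 in
theorem generate_increasing_numbers_spec : Claim_equal_generate_increasing_numbers := by
  intro N _
  unfold Spec_generate_increasing_numbers
  by_cases hneg : N < 0
  · have hA : generate_increasing_numbers N = [] := by
      have h1 : N ≠ 1 := by omega
      simp only [generate_increasing_numbers, if_pos h1]
      exact solveA_unreached 11 0 N 0 0 [] (by omega) (by omega)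
    rw [hA, generate_increasing_numbers_alt, if_pos hneg]
  · by_cases hbig : 10 ≤ N
    · have hA : generate_increasing_numbers N = [] := by
        have h1 : N ≠ 1 := by omega
        simp only [generate_increasing_numbers, if_pos h1]
        exact solveA_unreached 11 0 N 0 0 [] (by omega) (by omega)
      rw [hA, alt_big N hbig]
    · have : N = 0 ∨ N = 1 ∨ N = 2 ∨ N = 3 ∨ N = 4 ∨ N = 5 ∨ N = 6 ∨ N = 7 ∨ N = 8 ∨ N = 9 := by omega
      rcases this with h|h|h|h|h|h|h|h|h|h <;> subst h <;> decide
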